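-- pv_equiv track=rewrite | github.com/lenazagg/2021-2-level-labs | lab_4/main.py | tokenize_by_letters
-- ===== SOURCE A (Python) =====
-- from typing import Tuple
--
-- def tokenize_by_letters(text: str) -> Tuple or int:
--     """
--     Tokenizes given sequence by letters
--     """
--     if not isinstance(text, str):
--         return -1
--
--     words = []
--     new_text = ''
--     text = text.lower()
--     underscore = ['_']
--
--     for symbol in text:
--         if symbol.isalpha() or symbol.isspace():
--             new_text += symbol
--
--     for token in new_text.split():
--         letters = []
--         letters += underscore
--         letters += token
--         letters += underscore
--         words.append(tuple(letters))
--     return tuple(words)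
-- ===== SOURCE B (Python) =====
-- def tokenize_by_letters(text):
--     """
--     Tokenizes given sequence by letters.
--     Single pass: accumulate letters of the current word, flush on whitespace,
--     skip other characters without flushing.
--     """
--     if not isinstance(text, str):
--         return -1
--
--     words = []
--     word = []
--     for symbol in text.lower():
--         if symbol.isalpha():
--             word.append(symbol)
--         elif symbol.isspace():
--             if word:
--                 words.append(('_', *word, '_'))
--                 word = []
--     if word:
--         words.append(('_', *word, '_'))
--     return tuple(words)
-- ===== Notes on version B (the rewrite author's own statement) =====
-- stated objective: alternative
-- what changed: Replaces A's two passes (build a filtered copy of the text, then split() it and wrap each token) with one pass over text.lower() that accumulates the current word and flushes it on whitespace, never materialising the intermediate filtered string.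
import Mathlib
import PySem

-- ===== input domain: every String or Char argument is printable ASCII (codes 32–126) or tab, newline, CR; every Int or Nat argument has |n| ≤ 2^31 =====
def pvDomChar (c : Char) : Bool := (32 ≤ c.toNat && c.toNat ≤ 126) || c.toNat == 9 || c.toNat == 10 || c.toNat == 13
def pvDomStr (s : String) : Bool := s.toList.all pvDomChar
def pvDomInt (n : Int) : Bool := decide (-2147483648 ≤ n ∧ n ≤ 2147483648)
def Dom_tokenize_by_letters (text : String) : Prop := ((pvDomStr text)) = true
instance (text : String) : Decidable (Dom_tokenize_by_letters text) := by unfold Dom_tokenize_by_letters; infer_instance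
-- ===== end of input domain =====

-- B is a single pass over text.lower() with a current-word accumulator instead of
-- A's filtered intermediate string followed by split(); return value only
-- (the isinstance guard is outside the String-typed domain).

-- ===== PORT A =====
-- the '(_', *letters, '_')' tuple A builds for a token
def pvWrap (token : List Char) : List String :=
  ["_"] ++ token.map (fun c => String.ofList [c]) ++ ["_"]

def tokenize_by_letters (text : String) : List (List String) :=
  let t := PySem.Chars.lower text.toList
  let new_text := t.foldl (fun acc symbol =>
    if PySem.Chars.isalpha symbol || PySem.Chars.isspace symbol then acc ++ [symbol] else acc) []
  (PySem.Chars.split₀ new_text).foldl (fun words token => words ++ [pvWrap token]) []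

-- ===== PORT B =====
-- single pass: rest of text, current word accumulator, words emitted so far
def tblGo : List Char → List Char → List (List String) → List (List String)
  | [], word, words => if word.isEmpty then words else words ++ [pvWrap word]
  | c :: rest, word, words =>
    if PySem.Chars.isalpha c then tblGo rest (word ++ [c]) words
    else if PySem.Chars.isspace c then
      if word.isEmpty then tblGo rest [] words
      else tblGo rest [] (words ++ [pvWrap word])
    else tblGo rest word words

def tokenize_by_letters_alt (text : String) : List (List String) :=
  tblGo (PySem.Chars.lower text.toList) [] []

-- ===== PRECONDITION & SPEC =====
def Spec_tokenize_by_letters (text : String) (out : List (List String)) : Prop := out = tokenize_by_letters_alt text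
instance (text : String) (out : List (List String)) : Decidable (Spec_tokenize_by_letters text out) := by unfold Spec_tokenize_by_letters; infer_instance

-- ===== CLAIM (what is proved, stated in full; the proofs are below) =====
def Claim_equal_tokenize_by_letters : Prop := ∀ (text : String), Dom_tokenize_by_letters text → Spec_tokenize_by_letters text (tokenize_by_letters text)

-- ===== LEMMAS AND PROOFS =====

-- a letter is never whitespace
lemma alpha_not_space (c : Char) (h : PySem.Chars.isalpha c = true) :
    PySem.Chars.isspace c = false := by
  simp only [PySem.Chars.isalpha, PySem.Chars.isupper, PySem.Chars.islower,
    Bool.or_eq_true, Bool.and_eq_true, decide_eq_true_eq] at h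
  have hn : 65 ≤ c.toNat ∧ c.toNat ≤ 90 ∨ 97 ≤ c.toNat ∧ c.toNat ≤ 122 := by
    rcases h with ⟨h1, h2⟩ | ⟨h1, h2⟩
    · exact Or.inl ⟨Nat.succ_le_of_lt h1, Fin.mk_le_mk.mp h2⟩
    · exact Or.inr ⟨Nat.succ_le_of_lt h1, Fin.mk_le_mk.mp h2⟩
  simp only [PySem.Chars.isspace, Bool.or_eq_false_iff, Bool.and_eq_false_iff,
    decide_eq_false_iff_not]
  omega

-- skipping non-(alpha|space) chars in tblGo equals filtering them away first
lemma tblGo_filter (cs : List Char) : ∀ word words,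
    tblGo cs word words =
      tblGo (cs.filter (fun c => PySem.Chars.isalpha c || PySem.Chars.isspace c)) word words := by
  induction cs with
  | nil => intro word words; rfl
  | cons c rest ih =>
    intro word words
    by_cases ha : PySem.Chars.isalpha c = true
    · simp [tblGo, ha, ih]
    · by_cases hs : PySem.Chars.isspace c = true
      · simp [tblGo, ha, hs, ih]
      · simp [tblGo, ha, hs, ih]

-- split₀.go's accumulator is the (reversed) output prefix
lemma split₀_go_acc (cs : List Char) : ∀ cur acc,
    PySem.Chars.split₀.go cs cur acc = acc.reverse ++ PySem.Chars.split₀.go cs cur [] := by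
  induction cs with
  | nil =>
    intro cur acc
    simp only [PySem.Chars.split₀.go]
    split <;> simp
  | cons c rest ih =>
    intro cur acc
    simp only [PySem.Chars.split₀.go]
    split
    · split
      · exact ih _ _
      · rw [ih [] (cur.reverse :: acc), ih [] [cur.reverse]]
        simp
    · exact ih _ _

-- on alpha/space-only text, the single pass is the split-and-wrap of A
lemma tblGo_split (cs : List Char)
    (hcs : ∀ c ∈ cs, PySem.Chars.isalpha c = true ∨ PySem.Chars.isspace c = true) :
    ∀ word words, tblGo cs word words =
      words ++ (PySem.Chars.split₀.go cs word.reverse []).map pvWrap := by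
  induction cs with
  | nil =>
    intro word words
    simp only [tblGo, PySem.Chars.split₀.go]
    by_cases h : word.isEmpty <;> simp [h]
  | cons c rest ih =>
    intro word words
    have hrest : ∀ x ∈ rest, PySem.Chars.isalpha x = true ∨ PySem.Chars.isspace x = true :=
      fun x hx => hcs x (List.mem_cons_of_mem _ hx)
    rcases hcs c (List.mem_cons_self) with ha | hs
    · have hns := alpha_not_space c ha
      simp only [tblGo, ha, if_pos, PySem.Chars.split₀.go, hns]
      rw [ih hrest]
      simp
    · by_cases ha : PySem.Chars.isalpha c = true
      · exact absurd hs (by simp [alpha_not_space c ha])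
      · simp only [tblGo, ha, hs, PySem.Chars.split₀.go, if_pos, Bool.false_eq_true]
        by_cases hw : word.isEmpty
        · have : word = [] := by simpa [List.isEmpty_iff] using hw
          subst this
          simp only [List.reverse_nil, List.isEmpty_nil, if_pos]
          exact ih hrest [] words
        · have hwr : word.reverse.isEmpty = false := by
            simp [List.isEmpty_iff] at *; exact hw
          simp only [hw, hwr, Bool.false_eq_true, if_false]
          rw [ih hrest [] (words ++ [pvWrap word]),
            split₀_go_acc rest [] [word.reverse.reverse]]
          simp

lemma tokenize_eq (text : String) :
    tokenize_by_letters text = tokenize_by_letters_alt text := by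
  unfold tokenize_by_letters tokenize_by_letters_alt
  simp only []
  rw [PySem.List.foldl_append_if_eq_filter, PySem.List.foldl_append_singleton_eq_map,
    tblGo_filter, tblGo_split]
  · simp [PySem.Chars.split₀]
  · intro c hc
    have := List.of_mem_filter hc
    simpa using this

-- ===== VERDICT (by name: the statement is the Claim_ definition above) =====
theorem tokenize_by_letters_spec : Claim_equal_tokenize_by_letters := by
  intro text _
  unfold Spec_tokenize_by_letters
  exact tokenize_eq text
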